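-- pv_equiv track=rewrite | github.com/shreyadate05/MIPS_Simulator | mipsHelper.py | getNumUnitsCycles
-- ===== SOURCE A (Python) =====
-- def getNumUnitsCycles(configs):
--     numUnits = {}
--     unitCycles = {}
--     configs = [x.lower() for x in configs]
--
--     adder = [s for s in configs if "adder" in s]
--     if adder:
--         addData = adder[0].split(":")
--         addData = addData[1].split(",")
--         numUnits["ADDER"] = int(addData[0])
--         unitCycles["ADDER"] = int(addData[1])
--
--     multiplier = [s for s in configs if "multiplier" in s]
--     if multiplier:
--         mulData = multiplier[0].split(":")
--         mulData = mulData[1].split(",")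
--         numUnits["MULTIPLIER"] = int(mulData[0])
--         unitCycles["MULTIPLIER"] = int(mulData[1])
--
--     divider = [s for s in configs if "divider" in s]
--     if divider:
--         divData = divider[0].split(":")
--         divData = divData[1].split(",")
--         numUnits["DIVIDER"] = int(divData[0])
--         unitCycles["DIVIDER"] = int(divData[1])
--
--     return numUnits, unitCycles
-- ===== SOURCE B (Python) =====
-- def getNumUnitsCycles(configs):
--     # single pass: record the first lowered config containing each keyword
--     first = {}
--     for s in configs:
--         t = s.lower()
--         if "adder" in t and "adder" not in first:
--             first["adder"] = t
--         if "multiplier" in t and "multiplier" not in first: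
--             first["multiplier"] = t
--         if "divider" in t and "divider" not in first:
--             first["divider"] = t
--
--     numUnits = {}
--     unitCycles = {}
--     if "adder" in first:
--         fields = first["adder"].split(":")[1].split(",")
--         numUnits["ADDER"] = int(fields[0])
--         unitCycles["ADDER"] = int(fields[1])
--     if "multiplier" in first:
--         fields = first["multiplier"].split(":")[1].split(",")
--         numUnits["MULTIPLIER"] = int(fields[0])
--         unitCycles["MULTIPLIER"] = int(fields[1])
--     if "divider" in first:
--         fields = first["divider"].split(":")[1].split(",")
--         numUnits["DIVIDER"] = int(fields[0])
--         unitCycles["DIVIDER"] = int(fields[1])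
--     return numUnits, unitCycles
-- ===== Notes on version B (the rewrite author's own statement) =====
-- stated objective: alternative
-- what changed: A scans the config list three times (one list comprehension per keyword) and parses the head of each filtered list; B makes a single pass that records the first lowered config containing each keyword in a dict and then emits the two result dicts in the fixed ADDER/MULTIPLIER/DIVIDER order.
import Mathlib
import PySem

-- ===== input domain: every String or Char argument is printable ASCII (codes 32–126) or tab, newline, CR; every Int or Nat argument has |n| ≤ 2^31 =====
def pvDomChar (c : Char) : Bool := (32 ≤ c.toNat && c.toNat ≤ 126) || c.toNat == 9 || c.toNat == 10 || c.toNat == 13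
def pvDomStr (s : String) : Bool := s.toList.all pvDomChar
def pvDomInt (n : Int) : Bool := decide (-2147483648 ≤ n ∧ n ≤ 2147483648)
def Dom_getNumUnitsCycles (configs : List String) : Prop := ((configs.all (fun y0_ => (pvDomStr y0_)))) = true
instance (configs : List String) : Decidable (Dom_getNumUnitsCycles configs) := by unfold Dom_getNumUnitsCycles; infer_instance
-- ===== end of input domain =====

-- B replaces A's three separate scans of the config list with one single pass that
-- records the first lowered config containing each keyword, then emits the two dicts
-- in the fixed ADDER/MULTIPLIER/DIVIDER order (objective: alternative decomposition).

-- ===== PORT A =====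
def getNumUnitsCycles (configs : List String) : (List (String × Int)) × (List (String × Int)) :=
  let numUnits : PySem.Dict String Int := PySem.Dict.empty
  let unitCycles : PySem.Dict String Int := PySem.Dict.empty
  let configs := configs.map PySem.Str.lower
  let adder := configs.filter (fun s => PySem.Str.isIn "adder" s)
  let (numUnits, unitCycles) :=
    match adder with
    | [] => (numUnits, unitCycles)
    | a :: _ =>
      let addData := (PySem.Str.split? a ":").getD []
      let addData := (PySem.Str.split? (PySem.List.pyGetD addData 1 "") ",").getD []
      (numUnits.insert "ADDER" ((PySem.Int.ofStr? (PySem.List.pyGetD addData 0 "")).getD 0),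
       unitCycles.insert "ADDER" ((PySem.Int.ofStr? (PySem.List.pyGetD addData 1 "")).getD 0))
  let multiplier := configs.filter (fun s => PySem.Str.isIn "multiplier" s)
  let (numUnits, unitCycles) :=
    match multiplier with
    | [] => (numUnits, unitCycles)
    | m :: _ =>
      let mulData := (PySem.Str.split? m ":").getD []
      let mulData := (PySem.Str.split? (PySem.List.pyGetD mulData 1 "") ",").getD []
      (numUnits.insert "MULTIPLIER" ((PySem.Int.ofStr? (PySem.List.pyGetD mulData 0 "")).getD 0),
       unitCycles.insert "MULTIPLIER" ((PySem.Int.ofStr? (PySem.List.pyGetD mulData 1 "")).getD 0))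
  let divider := configs.filter (fun s => PySem.Str.isIn "divider" s)
  let (numUnits, unitCycles) :=
    match divider with
    | [] => (numUnits, unitCycles)
    | d :: _ =>
      let divData := (PySem.Str.split? d ":").getD []
      let divData := (PySem.Str.split? (PySem.List.pyGetD divData 1 "") ",").getD []
      (numUnits.insert "DIVIDER" ((PySem.Int.ofStr? (PySem.List.pyGetD divData 0 "")).getD 0),
       unitCycles.insert "DIVIDER" ((PySem.Int.ofStr? (PySem.List.pyGetD divData 1 "")).getD 0))
  (numUnits.items, unitCycles.items)

-- ===== PORT B =====
-- one loop iteration of B's first pass: record the lowered config for each keyword not yet seen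
def pvStepB (d : PySem.Dict String String) (s : String) : PySem.Dict String String :=
  let t := PySem.Str.lower s
  let d := if PySem.Str.isIn "adder" t && !(d.contains "adder") then d.insert "adder" t else d
  let d := if PySem.Str.isIn "multiplier" t && !(d.contains "multiplier") then d.insert "multiplier" t else d
  if PySem.Str.isIn "divider" t && !(d.contains "divider") then d.insert "divider" t else d

def getNumUnitsCycles_alt (configs : List String) : (List (String × Int)) × (List (String × Int)) :=
  let first := configs.foldl pvStepB PySem.Dict.empty
  let numUnits : PySem.Dict String Int := PySem.Dict.empty
  let unitCycles : PySem.Dict String Int := PySem.Dict.empty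
  let (numUnits, unitCycles) :=
    match first.get? "adder" with
    | none => (numUnits, unitCycles)
    | some t =>
      let fields := (PySem.Str.split? (PySem.List.pyGetD ((PySem.Str.split? t ":").getD []) 1 "") ",").getD []
      (numUnits.insert "ADDER" ((PySem.Int.ofStr? (PySem.List.pyGetD fields 0 "")).getD 0),
       unitCycles.insert "ADDER" ((PySem.Int.ofStr? (PySem.List.pyGetD fields 1 "")).getD 0))
  let (numUnits, unitCycles) :=
    match first.get? "multiplier" with
    | none => (numUnits, unitCycles)
    | some t =>
      let fields := (PySem.Str.split? (PySem.List.pyGetD ((PySem.Str.split? t ":").getD []) 1 "") ",").getD []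
      (numUnits.insert "MULTIPLIER" ((PySem.Int.ofStr? (PySem.List.pyGetD fields 0 "")).getD 0),
       unitCycles.insert "MULTIPLIER" ((PySem.Int.ofStr? (PySem.List.pyGetD fields 1 "")).getD 0))
  let (numUnits, unitCycles) :=
    match first.get? "divider" with
    | none => (numUnits, unitCycles)
    | some t =>
      let fields := (PySem.Str.split? (PySem.List.pyGetD ((PySem.Str.split? t ":").getD []) 1 "") ",").getD []
      (numUnits.insert "DIVIDER" ((PySem.Int.ofStr? (PySem.List.pyGetD fields 0 "")).getD 0),
       unitCycles.insert "DIVIDER" ((PySem.Int.ofStr? (PySem.List.pyGetD fields 1 "")).getD 0))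
  (numUnits.items, unitCycles.items)

-- ===== PRECONDITION & SPEC =====
-- Pre_ excludes inputs on which A raises (IndexError/ValueError): for each keyword that occurs
-- in some config (lowercased), the first such config must have a ':' and, after it, two
-- comma-separated fields both parseable by int(); elsewhere Python A returns normally.
def pvParses (o : Option String) : Bool :=
  match o with
  | none => true
  | some t =>
    let fields := (PySem.Str.split? (PySem.List.pyGetD ((PySem.Str.split? t ":").getD []) 1 "") ",").getD []
    (PySem.Int.ofStr? (PySem.List.pyGetD fields 0 "")).isSome &&
    (PySem.Int.ofStr? (PySem.List.pyGetD fields 1 "")).isSome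

def Pre_getNumUnitsCycles (configs : List String) : Prop :=
  pvParses ((configs.map PySem.Str.lower).find? (fun t => PySem.Str.isIn "adder" t)) = true ∧
  pvParses ((configs.map PySem.Str.lower).find? (fun t => PySem.Str.isIn "multiplier" t)) = true ∧
  pvParses ((configs.map PySem.Str.lower).find? (fun t => PySem.Str.isIn "divider" t)) = true

instance (configs : List String) : Decidable (Pre_getNumUnitsCycles configs) := by
  unfold Pre_getNumUnitsCycles; infer_instance

def pvWitness_getNumUnitsCycles : List String := ["Adder:2,4", "MULTIPLIER: 3 , 8", "foo", "divider:1,19"]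

def Spec_getNumUnitsCycles (configs : List String) (out : (List (String × Int)) × (List (String × Int))) : Prop := out = getNumUnitsCycles_alt configs
instance (configs : List String) (out : (List (String × Int)) × (List (String × Int))) : Decidable (Spec_getNumUnitsCycles configs out) := by unfold Spec_getNumUnitsCycles; infer_instance

-- ===== CLAIM (what is proved, stated in full; the proofs are below) =====
def Claim_equal_getNumUnitsCycles : Prop := ∀ (configs : List String), Dom_getNumUnitsCycles configs → Pre_getNumUnitsCycles configs → Spec_getNumUnitsCycles configs (getNumUnitsCycles configs)

-- ===== LEMMAS AND PROOFS =====

-- a guarded insert under a DIFFERENT key does not change get?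
lemma pv_get?_ite_insert_ne (d : PySem.Dict String String) (c : Prop) [Decidable c]
    (k' : String) (v : String) (k : String) (h : k ≠ k') :
    (if c then d.insert k' v else d).get? k = d.get? k := by
  split
  · exact PySem.Dict.get?_insert_of_ne d v h
  · rfl

-- a guarded insert under a DIFFERENT key does not change contains
lemma pv_contains_ite_insert_ne (d : PySem.Dict String String) (c : Prop) [Decidable c]
    (k' : String) (v : String) (k : String) (h : k ≠ k') :
    (if c then d.insert k' v else d).contains k = d.contains k := by
  rw [PySem.Dict.contains_eq_isSome_get?, PySem.Dict.contains_eq_isSome_get?,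
      pv_get?_ite_insert_ne d c k' v k h]

-- a guarded insert under the SAME key
lemma pv_get?_ite_insert_self (d : PySem.Dict String String) (c : Prop) [Decidable c]
    (k : String) (v : String) :
    (if c then d.insert k v else d).get? k = if c then some v else d.get? k := by
  split
  · exact PySem.Dict.get?_insert_self d k v
  · rfl

-- the value pvStepB leaves under one keyword key
lemma pvStepB_get (d : PySem.Dict String String) (s : String) (k : String)
    (hk : k = "adder" ∨ k = "multiplier" ∨ k = "divider") :
    (pvStepB d s).get? k =
      if PySem.Str.isIn k (PySem.Str.lower s) && !(d.contains k) then some (PySem.Str.lower s)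
      else d.get? k := by
  show (let t := PySem.Str.lower s;
        let d1 := if PySem.Str.isIn "adder" t && !(d.contains "adder") then d.insert "adder" t else d;
        let d2 := if PySem.Str.isIn "multiplier" t && !(d1.contains "multiplier") then d1.insert "multiplier" t else d1;
        if PySem.Str.isIn "divider" t && !(d2.contains "divider") then d2.insert "divider" t else d2).get? k = _
  simp only []
  rcases hk with h | h | h <;> subst h
  · rw [pv_get?_ite_insert_ne _ _ _ _ _ (by decide), pv_get?_ite_insert_ne _ _ _ _ _ (by decide),
        pv_get?_ite_insert_self]
  · rw [pv_get?_ite_insert_ne _ _ _ _ _ (by decide), pv_get?_ite_insert_self,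
        pv_contains_ite_insert_ne _ _ _ _ _ (by decide),
        pv_get?_ite_insert_ne _ _ _ _ _ (by decide)]
  · rw [pv_get?_ite_insert_self, pv_contains_ite_insert_ne _ _ _ _ _ (by decide),
        pv_contains_ite_insert_ne _ _ _ _ _ (by decide),
        pv_get?_ite_insert_ne _ _ _ _ _ (by decide), pv_get?_ite_insert_ne _ _ _ _ _ (by decide)]

-- after B's first pass, each keyword maps to the first lowered config containing it
lemma foldl_pvStepB_get (configs : List String) (d : PySem.Dict String String) (k : String)
    (hk : k = "adder" ∨ k = "multiplier" ∨ k = "divider") :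
    (configs.foldl pvStepB d).get? k =
      (d.get? k).or ((configs.map PySem.Str.lower).find? (fun t => PySem.Str.isIn k t)) := by
  induction configs generalizing d with
  | nil => simp
  | cons s rest ih =>
    simp only [List.foldl_cons, List.map_cons, List.find?_cons]
    rw [ih (pvStepB d s), pvStepB_get d s k hk]
    by_cases hin : PySem.Chars.isIn k.toList (PySem.Chars.lower s.toList) = true
    · cases hg : d.get? k with
      | none =>
        have hc : d.contains k = false := by simp [PySem.Dict.contains_eq_isSome_get?, hg]
        simp [hin, hc]
      | some v =>
        have hc : d.contains k = true := by simp [PySem.Dict.contains_eq_isSome_get?, hg]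
        simp [hin, hc]
    · simp [hin]

-- ===== VERDICT (by name: the statement is the Claim_ definition above) =====
theorem getNumUnitsCycles_spec : Claim_equal_getNumUnitsCycles := by
  intro configs _hdom _hpre
  unfold Spec_getNumUnitsCycles getNumUnitsCycles getNumUnitsCycles_alt
  have ha := foldl_pvStepB_get configs PySem.Dict.empty "adder" (Or.inl rfl)
  have hm := foldl_pvStepB_get configs PySem.Dict.empty "multiplier" (Or.inr (Or.inl rfl))
  have hd := foldl_pvStepB_get configs PySem.Dict.empty "divider" (Or.inr (Or.inr rfl))
  simp only [PySem.Dict.get?_empty, Option.none_or] at ha hm hd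
  rw [← List.head?_filter] at ha hm hd
  simp only [ha, hm, hd]
  cases (configs.map PySem.Str.lower).filter (fun t => PySem.Str.isIn "adder" t) <;>
  cases (configs.map PySem.Str.lower).filter (fun t => PySem.Str.isIn "multiplier" t) <;>
  cases (configs.map PySem.Str.lower).filter (fun t => PySem.Str.isIn "divider" t) <;>
    simp
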